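-- pv_equiv track=rewrite | github.com/lucaspin/advent-of-code | 2023/09/solution.py | go_up
-- ===== SOURCE A (Python) =====
-- def go_up(ns, level, part_one):
--   if level < 0:
--     return ns
--
--   below = ns[level+1]
--   diff = below[len(below)-1]
--   l = ns[level]
--   s = l[len(l)-1] + diff if part_one else l[len(l)-1] - diff
--   l.append(s)
--   ns[level] = l
--   return go_up(ns, level-1, part_one)
-- ===== SOURCE B (Python) =====
-- def go_up(ns, level, part_one):
--   if level < 0:
--     return ns
--   # stage 1: pure backward scan computing every value to append, carrying an accumulator
--   acc = ns[level + 1][-1]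
--   vals = []
--   for i in range(level, -1, -1):
--     last = ns[i][-1]
--     acc = last + acc if part_one else last - acc
--     vals.append(acc)
--   vals.reverse()
--   # stage 2: append the computed values to the first level+1 rows (zip truncates)
--   for row, v in zip(ns, vals):
--     row.append(v)
--   return ns
-- ===== Notes on version B (the rewrite author's own statement) =====
-- stated objective: alternative
-- what changed: A's tail recursion re-reads the just-mutated row below at every step; B is two staged passes: a pure backward scan that carries the propagated value in an accumulator and collects all values to append, then a zip pass that appends them to the rows.
import Mathlib
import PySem

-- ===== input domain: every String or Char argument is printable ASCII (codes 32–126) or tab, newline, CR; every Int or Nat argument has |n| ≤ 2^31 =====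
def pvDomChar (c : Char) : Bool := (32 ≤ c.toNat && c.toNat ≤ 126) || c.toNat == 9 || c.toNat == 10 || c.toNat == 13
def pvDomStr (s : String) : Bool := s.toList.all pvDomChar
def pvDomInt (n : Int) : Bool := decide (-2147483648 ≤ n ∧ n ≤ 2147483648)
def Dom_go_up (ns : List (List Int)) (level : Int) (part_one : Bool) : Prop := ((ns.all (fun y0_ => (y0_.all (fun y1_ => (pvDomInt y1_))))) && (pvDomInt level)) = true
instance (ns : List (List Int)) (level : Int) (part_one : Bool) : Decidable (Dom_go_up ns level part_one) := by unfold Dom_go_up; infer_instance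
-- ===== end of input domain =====

-- B replaces A's tail recursion (which re-reads the just-mutated row below at every step) by two
-- staged passes: a pure backward scan carrying the propagated value in an accumulator, then a zip
-- pass appending the collected values to the rows (in Python both mutate the rows of ns in place
-- identically and return the same object).


-- ===== PORT A =====
def go_up (ns : List (List Int)) (level : Int) (part_one : Bool) : List (List Int) :=
  if level < 0 then ns
  else
    match PySem.List.pyGet? ns (level + 1) with
    | none => []   -- IndexError, excluded by Pre_
    | some below =>
      match PySem.List.pyGet? below ((below.length : Int) - 1) with
      | none => []   -- IndexError, excluded by Pre_
      | some diff =>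
        match PySem.List.pyGet? ns level with
        | none => []   -- unreachable given level+1 in range
        | some l =>
          match PySem.List.pyGet? l ((l.length : Int) - 1) with
          | none => []   -- IndexError, excluded by Pre_
          | some last =>
            let s := if part_one then last + diff else last - diff
            go_up (ns.set level.toNat (l ++ [s])) (level - 1) part_one
termination_by (level + 1).toNat
decreasing_by omega

-- ===== PORT B =====
-- the body of Source B's first loop: `last = ns[i][-1]; acc = last + acc if part_one else last - acc`
-- (the `none` case is Python's IndexError, excluded by Pre_; the value there is irrelevant)
def go_up_altVal (ns : List (List Int)) (part_one : Bool) (acc : Int) (i : Int) : Int :=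
  match (PySem.List.pyGet? ns i).bind (fun row => PySem.List.pyGet? row (-1)) with
  | some last => if part_one then last + acc else last - acc
  | none => acc

def go_up_alt (ns : List (List Int)) (level : Int) (part_one : Bool) : List (List Int) :=
  if level < 0 then ns
  else
    match (PySem.List.pyGet? ns (level + 1)).bind (fun below => PySem.List.pyGet? below (-1)) with
    | none => []   -- IndexError (acc = ns[level+1][-1]), excluded by Pre_
    | some acc0 =>
      -- stage 1: scan collecting `vals` (kept reversed, as Source B appends then reverses)
      let st := (PySem.List.pyRange level (-1) (-1)).foldl
        (fun (st : Int × List Int) i =>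
          (go_up_altVal ns part_one st.1 i, st.2 ++ [go_up_altVal ns part_one st.1 i])) (acc0, [])
      let vals := st.2.reverse
      -- stage 2: `for row, v in zip(ns, vals): row.append(v)` — rebuild the mutated list
      (ns.zip vals).map (fun p => p.1 ++ [p.2]) ++ ns.drop vals.length

-- ===== PRECONDITION & SPEC =====
-- Pre_ excludes exactly the inputs on which the Python A raises IndexError:
-- level ≥ 0 with index level+1 out of range, or an empty row among ns[0..level+1].
def Pre_go_up (ns : List (List Int)) (level : Int) (part_one : Bool) : Prop :=
  level < 0 ∨ (level + 2 ≤ (ns.length : Int) ∧ ∀ j < (level + 2).toNat, ns.getD j [] ≠ [])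
instance (ns : List (List Int)) (level : Int) (part_one : Bool) : Decidable (Pre_go_up ns level part_one) := by unfold Pre_go_up; infer_instance

def pvWitness_go_up : List (List Int) × Int × Bool := ([[1, 3, 6], [2, 3], [1]], 1, true)

def Spec_go_up (ns : List (List Int)) (level : Int) (part_one : Bool) (out : List (List Int)) : Prop := out = go_up_alt ns level part_one
instance (ns : List (List Int)) (level : Int) (part_one : Bool) (out : List (List Int)) : Decidable (Spec_go_up ns level part_one out) := by unfold Spec_go_up; infer_instance

-- ===== CLAIM (what is proved, stated in full; the proofs are below) =====
def Claim_equal_go_up : Prop := ∀ (ns : List (List Int)) (level : Int) (part_one : Bool), Dom_go_up ns level part_one → Pre_go_up ns level part_one → Spec_go_up ns level part_one (go_up ns level part_one)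

-- ===== LEMMAS AND PROOFS =====

-- the scan's accumulator does not depend on the collected list, which grows by appends
theorem scan_split (g : Int → Int → Int) : ∀ (L : List Int) (a : Int) (v : List Int),
    L.foldl (fun (st : Int × List Int) i => (g st.1 i, st.2 ++ [g st.1 i])) (a, v)
      = ((L.foldl (fun (st : Int × List Int) i => (g st.1 i, st.2 ++ [g st.1 i])) (a, [])).1,
         v ++ (L.foldl (fun (st : Int × List Int) i => (g st.1 i, st.2 ++ [g st.1 i])) (a, [])).2) := by
  intro L
  induction L with
  | nil => intro a v; simp
  | cons x L ih =>
    intro a v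
    simp only [List.foldl_cons]
    rw [ih (g a x) (v ++ [g a x]), ih (g a x) ([] ++ [g a x])]
    simp

theorem scan_len (g : Int → Int → Int) : ∀ (L : List Int) (a : Int),
    (L.foldl (fun (st : Int × List Int) i => (g st.1 i, st.2 ++ [g st.1 i])) (a, [])).2.length
      = L.length := by
  intro L
  induction L with
  | nil => intro a; simp
  | cons x L ih =>
    intro a
    simp only [List.foldl_cons]
    rw [scan_split g L (g a x) ([] ++ [g a x])]
    simp [ih (g a x)]

theorem getLast_some (l : List Int) (h : l ≠ []) : ∃ x, l.getLast? = some x := by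
  cases hl : l.getLast? with
  | none => exact absurd (List.getLast?_eq_none_iff.mp hl) h
  | some x => exact ⟨x, rfl⟩

theorem pyGet_last (l : List Int) (h : l ≠ []) :
    PySem.List.pyGet? l ((l.length : Int) - 1) = l.getLast? := by
  have h0 : 0 < l.length := List.length_pos_iff.mpr h
  rw [PySem.List.pyGet?_of_nonneg _ (by omega)]
  have ht : ((l.length : Int) - 1).toNat = l.length - 1 := by omega
  rw [ht, List.getLast?_eq_getElem?]

-- reads of rows strictly below `level` are unchanged by the update at `level`
theorem altVal_set (ns : List (List Int)) (p : Bool) (n : Nat) (r : List Int)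
    (i : Int) (h0 : 0 ≤ i) (h1 : i < (n : Int)) (a : Int) :
    go_up_altVal (ns.set n r) p a i = go_up_altVal ns p a i := by
  unfold go_up_altVal
  rw [PySem.List.pyGet?_of_nonneg _ h0, PySem.List.pyGet?_of_nonneg _ h0,
    List.getElem?_set_ne (by omega)]

-- the list-surgery identity behind one step of B: appending s to row n and zipping one value
-- shorter is the same as zipping (v ++ [s]) against the original list
theorem final_eq (ns : List (List Int)) (v : List Int) (l : List Int) (s : Int) (n : Nat)
    (hv : v.length = n) (hn : n + 1 ≤ ns.length) (hl : ns[n]? = some l) :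
    (ns.zip (v ++ [s])).map (fun p => p.1 ++ [p.2]) ++ ns.drop (v ++ [s]).length
      = ((ns.set n (l ++ [s])).zip v).map (fun p => p.1 ++ [p.2])
        ++ (ns.set n (l ++ [s])).drop v.length := by
  have hnlt : n < ns.length := by omega
  have hget : ns[n] = l := by rw [List.getElem?_eq_getElem hnlt] at hl; exact Option.some.inj hl
  have htk : (ns.take n).length = n := by rw [List.length_take]; omega
  have hsplit : ns = ns.take n ++ (l :: ns.drop (n + 1)) := by
    conv_lhs => rw [← List.take_append_drop n ns]
    rw [List.drop_eq_getElem_cons hnlt, hget]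
  have hset : ns.set n (l ++ [s]) = ns.take n ++ ((l ++ [s]) :: ns.drop (n + 1)) := by
    rw [List.set_eq_take_append_cons_drop, if_pos hnlt]
  calc (ns.zip (v ++ [s])).map (fun p => p.1 ++ [p.2]) ++ ns.drop (v ++ [s]).length
      = ((ns.take n).zip v).map (fun p => p.1 ++ [p.2])
          ++ ((l ++ [s]) :: ns.drop (n + 1)) := by
        conv_lhs => rw [hsplit]
        rw [List.zip_append (by omega), List.zip_cons_cons, List.zip_nil_right]
        simp only [List.map_append, List.map_cons, List.map_nil, List.length_append,
          List.length_cons, hv]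
        rw [List.append_assoc, List.singleton_append]
        congr 2
        rw [show List.take n ns ++ l :: List.drop (n + 1) ns
          = (List.take n ns ++ [l]) ++ List.drop (n + 1) ns by simp,
          show n + ([].length + (1 : Nat)) = (List.take n ns ++ [l]).length by simp [htk],
          List.drop_left]
    _ = ((ns.set n (l ++ [s])).zip v).map (fun p => p.1 ++ [p.2])
          ++ (ns.set n (l ++ [s])).drop v.length := by
        have hz : (List.take n ns ++ ((l ++ [s]) :: List.drop (n + 1) ns)).zip v
            = (List.take n ns).zip v := by
          conv_lhs => rw [show v = v ++ ([] : List Int) by simp]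
          rw [List.zip_append (by omega), List.zip_nil_right, List.append_nil]
        have hd : List.drop v.length (List.take n ns ++ ((l ++ [s]) :: List.drop (n + 1) ns))
            = (l ++ [s]) :: List.drop (n + 1) ns := by
          rw [hv, List.drop_left' htk]
        rw [hset, hz, hd]

-- one step of B: updating row `level` and dropping to `level-1` does not change B's result
theorem alt_step (ns : List (List Int)) (level : Int) (p : Bool)
    (below l : List Int) (diff last : Int)
    (h0 : 0 ≤ level) (hlen : level + 2 ≤ (ns.length : Int))
    (hb : PySem.List.pyGet? ns (level + 1) = some below)
    (hd : below.getLast? = some diff)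
    (ha : PySem.List.pyGet? ns level = some l)
    (hl : l.getLast? = some last) :
    go_up_alt ns level p
      = go_up_alt (ns.set level.toNat (l ++ [if p then last + diff else last - diff])) (level - 1) p := by
  have hnlt : level.toNat < ns.length := by omega
  set s : Int := if p then last + diff else last - diff with hs
  have hscr : (PySem.List.pyGet? ns (level + 1)).bind (fun b => PySem.List.pyGet? b (-1)) = some diff := by
    rw [hb]; simp [PySem.List.pyGet?_neg_one, hd]
  have hv : ∀ a : Int, go_up_altVal ns p a level = (if p then last + a else last - a) := by
    intro a; unfold go_up_altVal; rw [ha]; simp [PySem.List.pyGet?_neg_one, hl]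
  have hgetl : ns[level.toNat]? = some l := by
    rw [← PySem.List.pyGet?_of_nonneg _ h0]; exact ha
  rcases eq_or_lt_of_le h0 with h00 | hpos
  · -- level = 0
    subst h00
    rw [go_up_alt, go_up_alt, if_neg (by omega), if_pos (by omega)]
    simp only [hscr]
    rw [PySem.List.pyRange_neg_one_cons (by omega), PySem.List.pyRange_neg_one_eq_nil (by omega)]
    simp only [List.foldl_cons, List.foldl_nil, hv diff, ← hs, List.nil_append, List.reverse_cons,
      List.reverse_nil, List.nil_append]
    cases ns with
    | nil => simp at hnlt
    | cons a0 tl =>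
      have ha0 : a0 = l := by simpa using hgetl
      subst ha0
      simp
  · -- 0 < level
    have hlev : ((level.toNat : Nat) : Int) = level := Int.toNat_of_nonneg h0
    have hscr' : (PySem.List.pyGet? (ns.set level.toNat (l ++ [s])) (level - 1 + 1)).bind
        (fun b => PySem.List.pyGet? b (-1)) = some s := by
      have he : level - 1 + 1 = level := by ring
      rw [he, PySem.List.pyGet?_of_nonneg _ h0, List.getElem?_set_self hnlt]
      simp [PySem.List.pyGet?_neg_one]
    rw [go_up_alt, go_up_alt, if_neg (by omega), if_neg (by omega)]
    simp only [hscr, hscr']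
    rw [PySem.List.pyRange_neg_one_cons (show (-1 : Int) < level by omega)]
    simp only [List.foldl_cons, hv diff, ← hs, List.nil_append]
    -- the scan over rows 0..level-1 reads the same rows in ns and in the updated list
    rw [PySem.List.foldl_congr_mem (PySem.List.pyRange (level - 1) (-1) (-1))
      (fun (st : Int × List Int) i => (go_up_altVal (ns.set level.toNat (l ++ [s])) p st.1 i,
        st.2 ++ [go_up_altVal (ns.set level.toNat (l ++ [s])) p st.1 i]))
      (fun (st : Int × List Int) i => (go_up_altVal ns p st.1 i, st.2 ++ [go_up_altVal ns p st.1 i]))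
      (s, [])
      (by
        intro acc x hx
        rcases PySem.List.mem_pyRange_neg_one.mp hx with ⟨hx1, hx2⟩
        simp only [altVal_set ns p level.toNat (l ++ [s]) x (by omega) (by omega)])]
    rw [scan_split (go_up_altVal ns p) (PySem.List.pyRange (level - 1) (-1) (-1)) s [s]]
    have hTlen : (((PySem.List.pyRange (level - 1) (-1) (-1)).foldl
        (fun (st : Int × List Int) i => (go_up_altVal ns p st.1 i, st.2 ++ [go_up_altVal ns p st.1 i]))
        (s, [])).2).length = level.toNat := by
      rw [scan_len (go_up_altVal ns p), PySem.List.length_pyRange_neg_one]; omega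
    simp only [List.singleton_append, List.reverse_cons]
    exact final_eq ns _ l s level.toNat (by simpa using hTlen) (by omega) hgetl

theorem main_lemma (n : Nat) : ∀ (ns : List (List Int)) (level : Int) (part_one : Bool),
    (level + 1).toNat = n → Pre_go_up ns level part_one →
    go_up ns level part_one = go_up_alt ns level part_one := by
  induction n with
  | zero =>
    intro ns level p hn _
    have hl : level < 0 := by omega
    rw [go_up, go_up_alt, if_pos hl, if_pos hl]
  | succ n ih =>
    intro ns level p hn hpre
    have hl0 : 0 ≤ level := by omega
    rcases hpre with h | ⟨hlen, hne⟩
    · omega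
    have hlt1 : (level + 1).toNat < ns.length := by omega
    have hlt0 : level.toNat < ns.length := by omega
    have hb : PySem.List.pyGet? ns (level + 1) = some (ns[(level + 1).toNat]'hlt1) := by
      rw [PySem.List.pyGet?_of_nonneg _ (by omega), List.getElem?_eq_getElem hlt1]
    have ha : PySem.List.pyGet? ns level = some (ns[level.toNat]'hlt0) := by
      rw [PySem.List.pyGet?_of_nonneg _ hl0, List.getElem?_eq_getElem hlt0]
    have hbne : ns[(level + 1).toNat]'hlt1 ≠ [] := by
      have := hne (level + 1).toNat (by omega)
      rwa [List.getD_eq_getElem?_getD, List.getElem?_eq_getElem hlt1] at this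
    have hlne : ns[level.toNat]'hlt0 ≠ [] := by
      have := hne level.toNat (by omega)
      rwa [List.getD_eq_getElem?_getD, List.getElem?_eq_getElem hlt0] at this
    obtain ⟨diff, hdiff⟩ := getLast_some _ hbne
    obtain ⟨last, hlast⟩ := getLast_some _ hlne
    set l := ns[level.toNat]'hlt0 with hldef
    set s : Int := if p then last + diff else last - diff with hsdef
    set ns' := ns.set level.toNat (l ++ [s]) with hnsdef
    have hstepA : go_up ns level p = go_up ns' (level - 1) p := by
      rw [go_up]
      simp only [if_neg (show ¬ level < 0 by omega), hb, pyGet_last _ hbne, hdiff, ha,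
        pyGet_last _ hlne, hlast]
      rfl
    have hstepB : go_up_alt ns level p = go_up_alt ns' (level - 1) p :=
      alt_step ns level p _ l diff last hl0 hlen hb hdiff ha hlast
    rw [hstepA, hstepB]
    apply ih ns' (level - 1) p (by omega)
    by_cases h0 : level = 0
    · left; omega
    · right
      constructor
      · simp only [hnsdef, List.length_set]; omega
      · intro j hj
        by_cases hjl : j = level.toNat
        · subst hjl
          simp [hnsdef, List.getD_eq_getElem?_getD, hlt0]
        · simp only [hnsdef, List.getD_eq_getElem?_getD, List.getElem?_set]
          rw [if_neg (fun h => hjl (Eq.symm h)), ← List.getD_eq_getElem?_getD]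
          exact hne j (by omega)

-- ===== VERDICT (by name: the statement is the Claim_ definition above) =====
theorem go_up_spec : Claim_equal_go_up := by
  intro ns level part_one _ hpre
  unfold Spec_go_up
  exact main_lemma (level + 1).toNat ns level part_one rfl hpre
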